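-- pv_equiv track=rewrite | github.com/saicgr/AIFitnessCoach | backend/services/warmup_stretch_algorithm.py | _filter_by_injuries
-- ===== SOURCE A (Python) =====
-- from typing import List, Dict, Any, Optional, Set
--
-- def _filter_by_injuries(
--
--     exercises: List[str],
--     injuries: List[str],
--     avoid_map: Dict[str, List[str]]
-- ) -> List[str]:
--     """Remove exercises that could aggravate injuries."""
--     if not injuries:
--         return exercises
--
--     # Build set of exercises to avoid
--     avoid_exercises: Set[str] = set()
--     for injury in injuries:
--         injury_lower = injury.lower()
--         for key, avoid_list in avoid_map.items():
--             if key in injury_lower: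
--                 avoid_exercises.update(ex.lower() for ex in avoid_list)
--
--     # Filter exercises
--     return [ex for ex in exercises if ex.lower() not in avoid_exercises]
-- ===== SOURCE B (Python) =====
-- from typing import List, Dict
--
-- def _filter_by_injuries(
--     exercises: List[str],
--     injuries: List[str],
--     avoid_map: Dict[str, List[str]]
-- ) -> List[str]:
--     """Progressively prune the exercise list, one triggered avoid entry at a time."""
--     if not injuries:
--         return exercises
--
--     survivors = exercises
--     for injury in injuries:
--         injury_lower = injury.lower()
--         for key, avoid_list in avoid_map.items():
--             if key in injury_lower:
--                 banned = [a.lower() for a in avoid_list]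
--                 survivors = [ex for ex in survivors if ex.lower() not in banned]
--     return survivors
-- ===== Notes on version B (the rewrite author's own statement) =====
-- stated objective: alternative
-- what changed: B never builds an avoid set: it keeps a shrinking survivors list and, for each (injury, avoid_map entry) pair whose key matches, makes another pruning pass over the survivors, so the result emerges by repeated filtering instead of one filter against a precomputed union set.
import Mathlib
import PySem

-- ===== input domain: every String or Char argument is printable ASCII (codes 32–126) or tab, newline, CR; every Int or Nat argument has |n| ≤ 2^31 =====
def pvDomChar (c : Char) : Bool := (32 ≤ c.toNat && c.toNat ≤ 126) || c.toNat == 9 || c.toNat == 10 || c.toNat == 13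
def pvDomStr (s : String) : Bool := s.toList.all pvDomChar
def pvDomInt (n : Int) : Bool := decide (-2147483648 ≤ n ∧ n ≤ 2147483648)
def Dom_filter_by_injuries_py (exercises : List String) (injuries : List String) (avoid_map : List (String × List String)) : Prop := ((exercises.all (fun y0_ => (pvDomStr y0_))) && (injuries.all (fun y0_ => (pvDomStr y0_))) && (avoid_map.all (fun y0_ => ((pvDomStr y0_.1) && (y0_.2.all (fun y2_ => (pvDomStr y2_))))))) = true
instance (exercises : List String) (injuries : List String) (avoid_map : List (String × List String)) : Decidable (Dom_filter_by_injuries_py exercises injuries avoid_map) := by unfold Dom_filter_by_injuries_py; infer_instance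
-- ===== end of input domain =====

-- B replaces A's precomputed avoid set with a shrinking survivors list pruned by one extra pass per triggered avoid_map entry (alternative decomposition, similar cost).


-- ===== PORT A =====
-- A builds a lowercased avoid set from injuries x avoid_map, then filters exercises against it.
def pvAvoidSet (items : List (String × List String)) (injuries : List String) : PySem.Set String :=
  injuries.foldl (fun s injury =>
    let injury_lower := PySem.Str.lower injury
    items.foldl (fun s kv =>
      if PySem.Str.isIn kv.1 injury_lower then PySem.Set.update s (kv.2.map PySem.Str.lower) else s) s)
    PySem.Set.empty

def filter_by_injuries_py (exercises : List String) (injuries : List String) (avoid_map : List (String × List String)) : List String :=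
  if injuries = [] then exercises
  else
    let avoid := pvAvoidSet (PySem.Dict.ofList avoid_map).items injuries
    exercises.filter (fun ex => !(PySem.Set.contains avoid (PySem.Str.lower ex)))

-- ===== PORT B =====
-- B keeps a survivors list and prunes it once per triggered (injury, avoid_map entry) pair.
def filter_by_injuries_py_alt (exercises : List String) (injuries : List String) (avoid_map : List (String × List String)) : List String :=
  if injuries = [] then exercises
  else
    injuries.foldl (fun survivors injury =>
      let injury_lower := PySem.Str.lower injury
      (PySem.Dict.ofList avoid_map).items.foldl (fun survivors kv =>
        if PySem.Str.isIn kv.1 injury_lower then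
          let banned := kv.2.map PySem.Str.lower
          survivors.filter (fun ex => !(banned.contains (PySem.Str.lower ex)))
        else survivors) survivors) exercises

-- ===== PRECONDITION & SPEC =====
def Spec_filter_by_injuries_py (exercises : List String) (injuries : List String) (avoid_map : List (String × List String)) (out : List String) : Prop := out = filter_by_injuries_py_alt exercises injuries avoid_map
instance (exercises : List String) (injuries : List String) (avoid_map : List (String × List String)) (out : List String) : Decidable (Spec_filter_by_injuries_py exercises injuries avoid_map out) := by unfold Spec_filter_by_injuries_py; infer_instance

-- ===== CLAIM (what is proved, stated in full; the proofs are below) =====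
def Claim_equal_filter_by_injuries_py : Prop := ∀ (exercises : List String) (injuries : List String) (avoid_map : List (String × List String)), Dom_filter_by_injuries_py exercises injuries avoid_map → Spec_filter_by_injuries_py exercises injuries avoid_map (filter_by_injuries_py exercises injuries avoid_map)

-- ===== LEMMAS AND PROOFS =====
-- A-side: membership in the folded avoid set, inner fold over avoid_map items
theorem pv_contains_inner_fold {items : List (String × List String)} {s : PySem.Set String}
    {il x : String} :
    (PySem.Set.contains
      (items.foldl (fun s kv =>
        if PySem.Str.isIn kv.1 il then PySem.Set.update s (kv.2.map PySem.Str.lower) else s) s) x)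
    = (PySem.Set.contains s x ||
       items.any (fun kv => PySem.Str.isIn kv.1 il && kv.2.any (fun a => PySem.Str.lower a == x))) := by
  induction items generalizing s with
  | nil => simp
  | cons kv rest ih =>
    simp only [List.foldl_cons, List.any_cons]
    rw [ih]
    by_cases h : PySem.Str.isIn kv.1 il = true
    · simp only [h, if_pos]
      have : PySem.Set.contains (PySem.Set.update s (kv.2.map PySem.Str.lower)) x
          = (PySem.Set.contains s x || kv.2.any (fun a => PySem.Str.lower a == x)) := by
        rw [Bool.eq_iff_iff]
        simp only [Bool.or_eq_true, PySem.Set.contains_iff,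
          PySem.Set.mem_update, List.mem_map, List.any_eq_true, beq_iff_eq]
      rw [this, Bool.or_assoc]
      simp
    · simp only [h]
      simp

-- A-side: membership in the full avoid set
theorem pv_contains_avoidSet {items : List (String × List String)} {injuries : List String}
    {s0 : PySem.Set String} {x : String} :
    PySem.Set.contains
      (injuries.foldl (fun s injury =>
        let injury_lower := PySem.Str.lower injury
        items.foldl (fun s kv =>
          if PySem.Str.isIn kv.1 injury_lower then PySem.Set.update s (kv.2.map PySem.Str.lower) else s) s) s0) x
    = (PySem.Set.contains s0 x ||
       injuries.any (fun injury => items.any (fun kv =>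
         PySem.Str.isIn kv.1 (PySem.Str.lower injury) && kv.2.any (fun a => PySem.Str.lower a == x)))) := by
  induction injuries generalizing s0 with
  | nil => simp
  | cons injury rest ih =>
    simp only [List.foldl_cons, List.any_cons]
    rw [ih, pv_contains_inner_fold]
    simp [Bool.or_assoc]

-- B-side: a fold of filters is one filter by the conjunction of the predicates
theorem pv_foldl_filter {α β : Type} (p : α → β → Bool) :
    ∀ (L : List α) (xs : List β),
      L.foldl (fun s a => s.filter (p a)) xs = xs.filter (fun b => L.all (fun a => p a b)) := by
  intro L
  induction L with
  | nil => intro xs; simp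
  | cons a rest ih =>
    intro xs
    simp only [List.foldl_cons, ih, List.filter_filter, List.all_cons]
    exact List.filter_congr (fun b _ => Bool.and_comm _ _)

-- B-side: the inner pruning fold is one filter
theorem pv_inner_prune (items : List (String × List String)) (il : String) (xs : List String) :
    items.foldl (fun survivors kv =>
      if PySem.Str.isIn kv.1 il then
        let banned := kv.2.map PySem.Str.lower
        survivors.filter (fun ex => !(banned.contains (PySem.Str.lower ex)))
      else survivors) xs
    = xs.filter (fun ex => items.all (fun kv =>
        !(PySem.Str.isIn kv.1 il) || !((kv.2.map PySem.Str.lower).contains (PySem.Str.lower ex)))) := by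
  induction items generalizing xs with
  | nil => simp
  | cons kv rest ih =>
    simp only [List.foldl_cons, List.all_cons]
    by_cases h : PySem.Str.isIn kv.1 il = true
    · simp only [h, if_pos, ih, List.filter_filter]
      simp only [Bool.not_true, Bool.false_or]
      exact List.filter_congr (fun b _ => Bool.and_comm _ _)
    · have hf : PySem.Chars.isIn kv.1.toList il.toList = false := by
        simpa [PySem.Str.isIn] using h
      rw [if_neg h, ih xs]
      apply List.filter_congr
      intro x _
      simp [PySem.Str.isIn, hf]

-- ===== VERDICT (by name: the statement is the Claim_ definition above) =====
theorem filter_by_injuries_py_spec : Claim_equal_filter_by_injuries_py := by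
  intro exercises injuries avoid_map _hdom
  unfold Spec_filter_by_injuries_py filter_by_injuries_py filter_by_injuries_py_alt pvAvoidSet
  by_cases h : injuries = []
  · simp [h]
  · simp only [h, ite_false]
    have hB : injuries.foldl (fun survivors injury =>
        let injury_lower := PySem.Str.lower injury
        (PySem.Dict.ofList avoid_map).items.foldl (fun survivors kv =>
          if PySem.Str.isIn kv.1 injury_lower then
            let banned := kv.2.map PySem.Str.lower
            survivors.filter (fun ex => !(banned.contains (PySem.Str.lower ex)))
          else survivors) survivors) exercises
      = exercises.filter (fun ex => injuries.all (fun injury =>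
          (PySem.Dict.ofList avoid_map).items.all (fun kv =>
            !(PySem.Str.isIn kv.1 (PySem.Str.lower injury)) ||
            !((kv.2.map PySem.Str.lower).contains (PySem.Str.lower ex))))) := by
      have := pv_foldl_filter (β := String)
        (fun injury ex => (PySem.Dict.ofList avoid_map).items.all (fun kv =>
            !(PySem.Str.isIn kv.1 (PySem.Str.lower injury)) ||
            !((kv.2.map PySem.Str.lower).contains (PySem.Str.lower ex)))) injuries exercises
      rw [← this]
      congr 1
      funext s injury
      exact pv_inner_prune _ _ s
    rw [hB]
    apply List.filter_congr
    intro ex _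
    rw [pv_contains_avoidSet]
    rw [Bool.eq_iff_iff]
    simp only [PySem.Set.contains, PySem.Set.empty, PySem.Str.isIn, List.all_eq_true,
      List.any_eq_true, Bool.not_eq_true', Bool.or_eq_true, Bool.and_eq_true,
      List.contains_eq_mem, List.mem_map, Bool.not_eq_true,
      decide_eq_false_iff_not, Bool.or_eq_false_iff, List.any_eq_false, not_exists, not_and]
    simp only [List.not_mem_nil, not_false_iff, true_and, beq_eq_false_iff_ne, ne_eq]
    constructor
    · intro H x hx p hp
      by_cases hin : PySem.Chars.isIn p.1.toList (PySem.Str.lower x).toList = true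
      · exact Or.inr (H x hx p hp hin)
      · exact Or.inl (by simpa using hin)
    · intro H x hx p hp hin y hy
      rcases H x hx p hp with hf | hp2
      · rw [hin] at hf
        cases hf
      · exact hp2 y hy
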